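-- pv_equiv track=rewrite | github.com/duthd3/Programmers | 코딩테스트입문/치킨 쿠폰.py | solution
-- ===== SOURCE A (Python) =====
-- def solution(chicken):
--     # 쿠폰 10장당 1마리
--     # 서비스 치킨에도 쿠폰 1장
--     answer = 0
--     coupon = 0
--     while chicken >= 1:
--         coupon += chicken % 10
--         chicken //= 10
--         answer += chicken + coupon // 10
--         coupon += (coupon // 10)
--         coupon %= 10
--
--     return answer
-- ===== SOURCE B (Python) =====
-- def solution(chicken):
--     # Closed form: each 9 coupons beyond the first effectively yield one bonus chicken.
--     if chicken < 1:
--         return 0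
--     return (chicken - 1) // 9
-- ===== Notes on version B (the rewrite author's own statement) =====
-- stated objective: simpler
-- what changed: Replaced the digit-by-digit coupon simulation loop with a guarded closed-form division by nine.
import Mathlib
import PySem

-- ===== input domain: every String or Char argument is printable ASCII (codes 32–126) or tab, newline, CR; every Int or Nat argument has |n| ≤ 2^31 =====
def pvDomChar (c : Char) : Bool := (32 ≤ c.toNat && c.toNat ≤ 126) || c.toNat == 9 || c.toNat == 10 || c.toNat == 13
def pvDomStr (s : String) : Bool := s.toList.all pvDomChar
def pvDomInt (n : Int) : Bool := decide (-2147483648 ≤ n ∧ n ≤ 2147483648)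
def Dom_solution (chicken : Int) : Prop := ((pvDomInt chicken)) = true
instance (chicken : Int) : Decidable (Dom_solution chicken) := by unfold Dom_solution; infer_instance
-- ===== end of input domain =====

-- B replaces A's coupon-simulation loop with the closed form (chicken-1)//9 (simpler).

-- ===== PORT A =====
-- the while loop of A: state (chicken, coupon, answer)
def solutionLoop (chicken coupon answer : Int) : Int :=
  if _h : chicken ≥ 1 then
    let c1 := coupon + PySem.Int.mod chicken 10
    let chicken' := PySem.Int.floordiv chicken 10
    let answer' := answer + chicken' + PySem.Int.floordiv c1 10
    let c2 := PySem.Int.mod (c1 + PySem.Int.floordiv c1 10) 10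
    solutionLoop chicken' c2 answer'
  else answer
termination_by chicken.toNat
decreasing_by
  rw [PySem.Int.floordiv_eq_ediv_of_pos (by norm_num)]
  omega

def solution (chicken : Int) : Int := solutionLoop chicken 0 0

-- ===== PORT B =====
def solution_alt (chicken : Int) : Int :=
  if chicken < 1 then 0 else PySem.Int.floordiv (chicken - 1) 9

-- ===== PRECONDITION & SPEC =====
def Spec_solution (chicken : Int) (out : Int) : Prop := out = solution_alt chicken
instance (chicken : Int) (out : Int) : Decidable (Spec_solution chicken out) := by unfold Spec_solution; infer_instance

-- ===== CLAIM (what is proved, stated in full; the proofs are below) =====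
def Claim_equal_solution : Prop := ∀ (chicken : Int), Dom_solution chicken → Spec_solution chicken (solution chicken)

-- ===== LEMMAS AND PROOFS =====

-- invariant of A's loop: for chicken ≥ 1 and a one-digit coupon count it returns answer + (chicken + coupon - 1)/9
theorem solutionLoop_closed (k : Nat) : ∀ (n c a : Int), n.toNat ≤ k → 1 ≤ n → 0 ≤ c → c ≤ 9 →
    solutionLoop n c a = a + (n + c - 1) / 9 := by
  induction k with
  | zero => intro n c a hk hn _ _; omega
  | succ k ih =>
    intro n c a hk hn hc0 hc9
    rw [solutionLoop]
    simp only [hn, dif_pos,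
      PySem.Int.floordiv_eq_ediv_of_pos (by norm_num : (0:Int) < 10),
      PySem.Int.mod_eq_emod_of_pos (by norm_num : (0:Int) < 10)]
    by_cases hq : 1 ≤ n / 10
    · rw [ih _ _ _ (by omega) hq (by omega) (by omega)]
      omega
    · rw [solutionLoop, dif_neg (by omega : ¬ (n / 10 ≥ 1))]
      omega

theorem solution_eq_closed (n : Int) : solution n = solution_alt n := by
  unfold solution solution_alt
  by_cases hn : 1 ≤ n
  · rw [solutionLoop_closed n.toNat n 0 0 (le_refl _) hn (by omega) (by omega)]
    rw [if_neg (by omega)]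
    rw [PySem.Int.floordiv_eq_ediv_of_pos (by norm_num : (0:Int) < 9)]
    omega
  · rw [solutionLoop, dif_neg (by omega), if_pos (by omega)]

-- ===== VERDICT (by name: the statement is the Claim_ definition above) =====
theorem solution_spec : Claim_equal_solution := by
  intro chicken _
  exact solution_eq_closed chicken
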